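-- pv_equiv track=rewrite | github.com/Seal-Li/EGES-Graph-Embedding | utils.py | node_transfer
-- ===== SOURCE A (Python) =====
-- def node_transfer(node_raw_ids):
--     # raw_id -> new_id and new_id -> raw_id
--     node_encoder, node_decoder = {}, []
--     node_id = -1
--     for node_raw_id in node_raw_ids:
--         node_id = encode_id(node_encoder,
--                         node_decoder,
--                         node_raw_id,
--                         node_id)
--     return node_encoder, node_decoder
--
-- def encode_id(encoder, decoder, raw_id, encoded_id):
--     if raw_id in encoder:
--         return encoded_id
--     else:
--         encoded_id += 1
--         encoder[raw_id] = encoded_id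
--         decoder.append(raw_id)
--
--     return encoded_id
-- ===== SOURCE B (Python) =====
-- def node_transfer(node_raw_ids):
--     # Two staged passes instead of one threaded-accumulator loop:
--     # (1) ordered dedup gives the decoder, (2) enumerate it to build the encoder.
--     node_decoder = list(dict.fromkeys(node_raw_ids))
--     node_encoder = {raw_id: new_id for new_id, raw_id in enumerate(node_decoder)}
--     return node_encoder, node_decoder
-- ===== Notes on version B (the rewrite author's own statement) =====
-- stated objective: idiomatic
-- what changed: Replaced the single loop threading a node_id accumulator through an encode_id helper by two staged passes: dict.fromkeys ordered dedup produces the decoder, then an enumerate comprehension builds the encoder from it.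
import Mathlib
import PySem

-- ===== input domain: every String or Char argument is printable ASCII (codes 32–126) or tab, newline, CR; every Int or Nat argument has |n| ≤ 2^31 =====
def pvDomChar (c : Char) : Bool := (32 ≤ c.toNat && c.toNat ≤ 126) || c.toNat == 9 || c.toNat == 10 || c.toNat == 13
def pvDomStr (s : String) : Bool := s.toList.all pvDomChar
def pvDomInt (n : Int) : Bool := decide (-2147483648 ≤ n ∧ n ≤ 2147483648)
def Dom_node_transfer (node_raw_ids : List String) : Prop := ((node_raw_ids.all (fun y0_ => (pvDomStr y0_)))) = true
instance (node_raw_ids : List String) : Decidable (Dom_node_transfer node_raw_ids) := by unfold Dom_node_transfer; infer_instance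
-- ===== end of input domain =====

-- B replaces A's single accumulator-threading loop by two staged passes: ordered dedup (the decoder), then enumerate it (the encoder).


-- ===== PORT A =====
-- encode_id(encoder, decoder, raw_id, encoded_id): returns (new encoder, new decoder, returned id)
def encode_id (encoder : PySem.Dict String Int) (decoder : List String) (raw_id : String)
    (encoded_id : Int) : PySem.Dict String Int × List String × Int :=
  if encoder.contains raw_id then
    (encoder, decoder, encoded_id)
  else
    let encoded_id := encoded_id + 1
    (encoder.insert raw_id encoded_id, decoder ++ [raw_id], encoded_id)

def node_transfer (node_raw_ids : List String) : (List (String × Int)) × List String :=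
  let st := node_raw_ids.foldl
    (fun (s : PySem.Dict String Int × List String × Int) node_raw_id =>
      encode_id s.1 s.2.1 node_raw_id s.2.2)
    (PySem.Dict.empty, [], -1)
  (st.1.items, st.2.1)

-- ===== PORT B =====
def node_transfer_alt (node_raw_ids : List String) : (List (String × Int)) × List String :=
  let node_decoder := PySem.List.dedup node_raw_ids
  let node_encoder := (PySem.List.enumerate node_decoder).foldl
    (fun (d : PySem.Dict String Int) p => d.insert p.2 p.1) PySem.Dict.empty
  (node_encoder.items, node_decoder)

-- ===== PRECONDITION & SPEC =====
def Spec_node_transfer (node_raw_ids : List String) (out : (List (String × Int)) × List String) : Prop := out = node_transfer_alt node_raw_ids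
instance (node_raw_ids : List String) (out : (List (String × Int)) × List String) : Decidable (Spec_node_transfer node_raw_ids out) := by unfold Spec_node_transfer; infer_instance

-- ===== CLAIM =====
def Claim_equal_node_transfer : Prop := ∀ (node_raw_ids : List String), Dom_node_transfer node_raw_ids → Spec_node_transfer node_raw_ids (node_transfer node_raw_ids)

-- ===== LEMMAS AND PROOFS =====

-- B's encoder as a function of the decoder list (exactly the fold in node_transfer_alt).
def encB (dec : List String) : PySem.Dict String Int :=
  (PySem.List.enumerate dec).foldl (fun d p => d.insert p.2 p.1) PySem.Dict.empty

theorem items_encB (dec : List String) (h : dec.Nodup) :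
    (encB dec).items = (PySem.List.enumerate dec).map (fun p => (p.2, p.1)) := by
  unfold encB
  rw [PySem.Dict.items_foldl_insert_fresh]
  · simp [PySem.Dict.empty]
  · intro a _; exact PySem.Dict.contains_empty _
  · rw [PySem.List.map_snd_enumerate]; exact h

theorem keys_encB (dec : List String) (h : dec.Nodup) : (encB dec).keys = dec := by
  show (encB dec).items.map (·.1) = dec
  rw [items_encB dec h, List.map_map]
  exact PySem.List.map_snd_enumerate dec 0

theorem contains_encB (dec : List String) (h : dec.Nodup) (x : String) :
    (encB dec).contains x = decide (x ∈ dec) := by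
  rw [PySem.Dict.contains_eq_decide_mem_keys, keys_encB dec h]

theorem encB_append (dec : List String) (x : String) :
    encB (dec ++ [x]) = (encB dec).insert x (dec.length : Int) := by
  unfold encB
  rw [PySem.List.enumerate_append, List.foldl_append]
  simp [PySem.List.enumerate_cons, PySem.List.enumerate_nil]

theorem fold_eq (l dec : List String) (hnd : dec.Nodup) :
    l.foldl (fun (s : PySem.Dict String Int × List String × Int) r =>
        encode_id s.1 s.2.1 r s.2.2) (encB dec, dec, (dec.length : Int) - 1)
    = (encB (PySem.Set.update dec l), PySem.Set.update dec l,
       ((PySem.Set.update dec l).length : Int) - 1) := by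
  induction l generalizing dec with
  | nil => simp [PySem.Set.update_nil]
  | cons x xs ih =>
    rw [List.foldl_cons, PySem.Set.update_cons]
    by_cases hx : x ∈ dec
    · have : encode_id (encB dec) dec x ((dec.length : Int) - 1)
          = (encB dec, dec, (dec.length : Int) - 1) := by
        simp [encode_id, contains_encB dec hnd, hx]
      rw [this, PySem.Set.add_of_mem hx]
      exact ih dec hnd
    · have : encode_id (encB dec) dec x ((dec.length : Int) - 1)
          = (encB (dec ++ [x]), dec ++ [x], ((dec ++ [x]).length : Int) - 1) := by
        simp [encode_id, contains_encB dec hnd, hx, encB_append]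
      rw [this, PySem.Set.add_of_not_mem hx]
      exact ih (dec ++ [x]) (by simp [List.nodup_append, hnd]; exact fun a ha he => hx (he ▸ ha))

-- ===== VERDICT =====
theorem node_transfer_spec : Claim_equal_node_transfer := by
  intro l _
  unfold Spec_node_transfer node_transfer node_transfer_alt
  have h0 : (PySem.Dict.empty : PySem.Dict String Int) = encB [] := rfl
  rw [h0]
  have : ((([] : List String).length : Int) - 1) = -1 := by simp
  rw [← this, fold_eq l [] List.nodup_nil, PySem.Set.update_nil_left]
  simp [encB]
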